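-- pv_equiv track=rewrite | github.com/OleksiiDovhaniuk/GCG_v1.0 | calculation.py | find_elementsNumber
-- ===== SOURCE A (Python) =====
-- def find_elementsNumber(gene_list3D):
--     """ Return number of elements of schemotechnical system.
--
--     Examples of execution:
--     >>> c.find_elementsNumber(gene_test1)
--     1
--     >>> c.find_elementsNumber(gene_test2)
--     3
--     >>> c.find_elementsNumber(gene_test3)
--     0
--     >>> c.find_elementsNumber(gene_test4)
--     18
--     """
--     elementsNumber = 0
--
--     for x in gene_list3D:
--         check_list = [0]
--         for i in range(len(x)):
--             if x[i][0] not in check_list: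
--                 check_list.append(x[i][0])
--                 elementsNumber += 1
--
--     return elementsNumber
-- ===== SOURCE B (Python) =====
-- def find_elementsNumber(gene_list3D):
--     total = 0
--     for row in gene_list3D:
--         prev = 0
--         for h in sorted(e[0] for e in row):
--             if h != 0 and h != prev:
--                 total += 1
--             prev = h
--     return total
-- ===== Notes on version B (the rewrite author's own statement) =====
-- stated objective: alternative
-- what changed: Replaces A's per-row membership-list scan (check_list seeded with 0, linear 'not in' test per element) by a sort-then-single-scan dedup: per row the first elements are sorted and a new distinct nonzero id is counted whenever the value differs from its predecessor.
-- outside the precondition, e.g. on find_elementsNumber([[[]]]): A raises IndexError, B raises IndexError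
import Mathlib
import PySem

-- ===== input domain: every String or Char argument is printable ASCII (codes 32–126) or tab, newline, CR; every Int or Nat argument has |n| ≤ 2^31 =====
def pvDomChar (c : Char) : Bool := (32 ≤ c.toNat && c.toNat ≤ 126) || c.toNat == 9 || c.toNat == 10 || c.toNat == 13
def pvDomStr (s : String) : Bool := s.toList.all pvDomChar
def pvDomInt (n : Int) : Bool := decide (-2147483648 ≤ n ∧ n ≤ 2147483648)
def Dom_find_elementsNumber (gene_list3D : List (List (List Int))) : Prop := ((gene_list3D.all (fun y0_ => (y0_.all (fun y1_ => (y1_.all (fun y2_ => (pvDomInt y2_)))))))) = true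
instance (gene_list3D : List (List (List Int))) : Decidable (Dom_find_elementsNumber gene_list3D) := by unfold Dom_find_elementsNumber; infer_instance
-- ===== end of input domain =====

-- B replaces A's per-row membership-list scan by a sort-then-scan dedup of the rows' first elements (alternative algorithm, same results).


-- ===== PORT A =====
-- 'if x[i][0] not in check_list: check_list.append(x[i][0]); elementsNumber += 1'
-- (x[i][0] is ported with pyGetD; the IndexError case e = [] is excluded by Pre_ below)
def pvBumpA (st : List Int × Int) (v : Int) : List Int × Int :=
  if v ∈ st.1 then st else (st.1 ++ [v], st.2 + 1)

def find_elementsNumber (gene_list3D : List (List (List Int))) : Int :=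
  (gene_list3D.foldl (fun n x =>
    ((PySem.List.pyRange 0 (x.length : Int)).foldl
      (fun st i => pvBumpA st (PySem.List.pyGetD (PySem.List.pyGetD x i []) 0 0))
      (([0] : List Int), n)).2) 0)

-- ===== PORT B =====
-- state = (prev, total); 'if h != 0 and h != prev: total += 1; prev = h'
def pvStepB (st : Int × Int) (h : Int) : Int × Int :=
  (h, if h ≠ 0 ∧ h ≠ st.1 then st.2 + 1 else st.2)

def find_elementsNumber_alt (gene_list3D : List (List (List Int))) : Int :=
  gene_list3D.foldl (fun total row =>
    ((PySem.List.sorted (row.map (fun e => PySem.List.pyGetD e 0 0)) id).foldl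
      pvStepB (0, total)).2) 0

-- ===== PRECONDITION & SPEC =====
-- Pre_ excludes exactly the inputs where some innermost list is empty: there Python A (and B) raise IndexError on e[0].
def Pre_find_elementsNumber (gene_list3D : List (List (List Int))) : Prop :=
  ∀ x ∈ gene_list3D, ∀ e ∈ x, e ≠ []
instance (gene_list3D : List (List (List Int))) : Decidable (Pre_find_elementsNumber gene_list3D) := by
  unfold Pre_find_elementsNumber; infer_instance

def pvWitness_find_elementsNumber : List (List (List Int)) := [[[1], [2, 0]], [[1], [0, 5]]]

def Spec_find_elementsNumber (gene_list3D : List (List (List Int))) (out : Int) : Prop := out = find_elementsNumber_alt gene_list3D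
instance (gene_list3D : List (List (List Int))) (out : Int) : Decidable (Spec_find_elementsNumber gene_list3D out) := by unfold Spec_find_elementsNumber; infer_instance

-- ===== CLAIM (what is proved, stated in full; the proofs are below) =====
def Claim_equal_find_elementsNumber : Prop := ∀ (gene_list3D : List (List (List Int))), Dom_find_elementsNumber gene_list3D → Pre_find_elementsNumber gene_list3D → Spec_find_elementsNumber gene_list3D (find_elementsNumber gene_list3D)

-- ===== LEMMAS AND PROOFS =====

-- A's inner loop counts the distinct elements of l that are not already in check_list cl.
lemma pvBumpA_snd : ∀ (l cl : List Int) (n : Int),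
    (l.foldl pvBumpA (cl, n)).2 = n + ((l.toFinset \ cl.toFinset).card : Int) := by
  intro l
  induction l with
  | nil => intro cl n; simp
  | cons v t ih =>
    intro cl n
    simp only [List.foldl_cons, pvBumpA]
    by_cases h : v ∈ cl
    · rw [if_pos h, ih]
      have hset : (v :: t).toFinset \ cl.toFinset = t.toFinset \ cl.toFinset := by
        simp [List.toFinset_cons, Finset.insert_sdiff_of_mem _ (List.mem_toFinset.mpr h)]
      rw [hset]
    · rw [if_neg h, ih]
      have hcl : (cl ++ [v]).toFinset = insert v cl.toFinset := by
        ext a; simp [List.toFinset_append]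
      have hvn : v ∉ cl.toFinset := by simpa using h
      have hsd : (v :: t).toFinset \ cl.toFinset = insert v (t.toFinset \ cl.toFinset) := by
        ext a
        simp only [List.toFinset_cons, Finset.mem_sdiff, Finset.mem_insert]
        constructor
        · rintro ⟨hv | ha, hc⟩
          · exact Or.inl hv
          · exact Or.inr ⟨ha, hc⟩
        · rintro (rfl | ⟨ha, hc⟩)
          · exact ⟨Or.inl rfl, hvn⟩
          · exact ⟨Or.inr ha, hc⟩
      rw [hcl, hsd, Finset.sdiff_insert]
      have h1 : (insert v (t.toFinset \ cl.toFinset)).card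
          = ((t.toFinset \ cl.toFinset).erase v).card + 1 := by
        rw [Finset.card_insert_eq_ite, Finset.card_erase_eq_ite]
        by_cases hv : v ∈ t.toFinset \ cl.toFinset
        · have : 1 ≤ (t.toFinset \ cl.toFinset).card :=
            Finset.card_pos.mpr ⟨v, hv⟩
          simp only [if_pos hv]; omega
        · simp [hv]
      rw [h1]; push_cast; ring

-- B's scan over a sorted list counts the distinct nonzero elements (not equal to the seed prev).
lemma pvStepB_snd : ∀ (s : List Int) (prev total : Int),
    s.Pairwise (· ≤ ·) → (prev = 0 ∨ ∀ a ∈ s, prev ≤ a) →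
    (s.foldl pvStepB (prev, total)).2
      = total + (((s.toFinset.erase 0).erase prev).card : Int) := by
  intro s
  induction s with
  | nil => intro prev total _ _; simp
  | cons v t ih =>
    intro prev total hpw hpre
    have hle : ∀ a ∈ t, v ≤ a := (List.pairwise_cons.mp hpw).1
    have hpwt : t.Pairwise (· ≤ ·) := (List.pairwise_cons.mp hpw).2
    simp only [List.foldl_cons, pvStepB]
    by_cases hc : v ≠ 0 ∧ v ≠ prev
    · rw [if_pos hc]
      rw [ih v (total + 1) hpwt (Or.inr hle)]
      -- prev ∉ (v :: t) in the case prev ≠ 0; in the case prev = 0 erase prev = erase 0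
      have hkey : (((v :: t).toFinset.erase 0).erase prev).card
          = ((t.toFinset.erase 0).erase v).card + 1 := by
        have hins : (v :: t).toFinset.erase 0 = insert v (t.toFinset.erase 0) := by
          rw [List.toFinset_cons, Finset.erase_insert_of_ne hc.1]
        have hcard : (insert v (t.toFinset.erase 0)).card
            = ((t.toFinset.erase 0).erase v).card + 1 := by
          by_cases hv : v ∈ t.toFinset.erase 0
          · rw [Finset.insert_eq_self.mpr hv, ← Finset.card_erase_add_one hv]
          · rw [Finset.card_insert_of_notMem hv, Finset.erase_eq_of_notMem hv]
        rcases hpre with rfl | hall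
        · rw [Finset.erase_idem, hins, hcard]
        · have hpv : prev < v := lt_of_le_of_ne (hall v (by simp)) (Ne.symm hc.2)
          have hnm : prev ∉ insert v (t.toFinset.erase 0) := by
            simp only [Finset.mem_insert, Finset.mem_erase, List.mem_toFinset]
            rintro (rfl | ⟨-, hmem⟩)
            · exact lt_irrefl prev hpv
            · exact lt_irrefl prev (lt_of_lt_of_le hpv (hle _ hmem))
          rw [hins, Finset.erase_eq_of_notMem hnm, hcard]
      rw [hkey]; push_cast; ring
    · rw [if_neg hc]
      by_cases hv0 : v = 0
      · subst hv0
        have hpre' : (0 : Int) = 0 ∨ ∀ a ∈ t, (0 : Int) ≤ a := Or.inl rfl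
        rw [ih 0 total hpwt hpre']
        have hset : (0 :: t).toFinset.erase 0 = t.toFinset.erase 0 := by
          rw [List.toFinset_cons, Finset.erase_insert_eq_erase]
        have hset2 : (t.toFinset.erase 0).erase prev = t.toFinset.erase 0 := by
          by_cases hp0 : prev = 0
          · subst hp0; exact Finset.erase_idem
          · rcases hpre with rfl | hall
            · exact absurd rfl hp0
            · apply Finset.erase_eq_of_notMem
              simp only [Finset.mem_erase, List.mem_toFinset]
              rintro ⟨-, hmem⟩
              exact hp0 (le_antisymm (hall 0 (by simp)) (hle _ hmem))
        rw [hset, hset2, Finset.erase_idem]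
      · have hvp : v = prev := by tauto
        subst hvp
        rw [ih v total hpwt (Or.inr hle)]
        have hset : ((v :: t).toFinset.erase 0).erase v = (t.toFinset.erase 0).erase v := by
          rw [List.toFinset_cons, Finset.erase_insert_of_ne hv0, Finset.erase_insert_eq_erase]
        rw [hset]

-- Per-row equality: A's count from check_list [0] equals B's sorted-scan count.
lemma pvRow_eq (row : List (List Int)) (n : Int) :
    ((PySem.List.pyRange 0 (row.length : Int)).foldl
      (fun st i => pvBumpA st (PySem.List.pyGetD (PySem.List.pyGetD row i []) 0 0))
      (([0] : List Int), n)).2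
    = ((PySem.List.sorted (row.map (fun e => PySem.List.pyGetD e 0 0)) id).foldl
        pvStepB (0, n)).2 := by
  rw [PySem.List.foldl_pyRange_zero_pyGetD' row [] (fun st e => pvBumpA st (PySem.List.pyGetD e 0 0)) (([0] : List Int), n)]
  rw [← List.foldl_map (f := fun e => PySem.List.pyGetD e 0 0) (g := pvBumpA)]
  set hd := row.map (fun e => PySem.List.pyGetD e 0 0) with hhd
  rw [pvBumpA_snd hd [0] n]
  rw [pvStepB_snd (PySem.List.sorted hd id) 0 n
      (by simpa using PySem.List.sorted_pairwise hd id) (Or.inl rfl)]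
  have hperm : (PySem.List.sorted hd id).toFinset = hd.toFinset :=
    List.toFinset_eq_of_perm _ _ (PySem.List.sorted_perm hd id false)
  rw [hperm, Finset.erase_idem]
  have : hd.toFinset \ ([0] : List Int).toFinset = hd.toFinset.erase 0 := by
    simp [Finset.sdiff_singleton_eq_erase]
  rw [this]

-- ===== VERDICT (by name: the statement is the Claim_ definition above) =====
theorem find_elementsNumber_spec : Claim_equal_find_elementsNumber := by
  intro g hd hp
  clear hd hp
  unfold Spec_find_elementsNumber find_elementsNumber find_elementsNumber_alt
  induction g using List.reverseRecOn with
  | nil => rfl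
  | append_singleton t x ih =>
    rw [List.foldl_append, List.foldl_append, List.foldl_cons, List.foldl_nil,
        List.foldl_cons, List.foldl_nil, ih, pvRow_eq]
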